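-- pv_equiv track=rewrite | github.com/La0/parsepatch | parsepatch/patch.py | get_touched
-- ===== SOURCE A (Python) =====
-- def get_touched(added, deleted):
--     # negative line numbers are for empty lines (i.e. whites, comments, ...)
--     # off course we keep positive lines
--     # but we keep common lines which aren't both negative
--     # if added=[1,2,3,4,-5,-6,-7,8,10] and deleted=[4,5,6,-7,9,-10]
--     # then res_a=[1,2,3,8], res_d=[9], res_t=[4,5,6,10]
--     added = set(added)
--     deleted = set(deleted)
--
--     touched = set(abs(x) for x in added
--                   if (x > 0 and {x, -x} & deleted))
--     touched |= set(abs(x) for x in deleted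
--                    if (x > 0 and {x, -x} & added))
--     added = [x for x in added if x > 0 and x not in touched]
--     deleted = [x for x in deleted if x > 0 and x not in touched]
--     touched = list(sorted(touched))
--     added = list(sorted(added))
--     deleted = list(sorted(deleted))
--
--     return added, deleted, touched
-- ===== SOURCE B (Python) =====
-- def get_touched(added, deleted):
--     # One keyed pass: for each nonzero line number record, under its absolute
--     # value, which of the four roles it plays (positive/negative in added,
--     # positive/negative in deleted); then a single sweep over the sorted keys
--     # classifies each line as added, deleted or touched.
--     flags = {}
--     for x in added:
--         if x:
--             k = abs(x)
--             pa, na, pd, nd = flags.get(k, (False, False, False, False))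
--             if x > 0:
--                 pa = True
--             else:
--                 na = True
--             flags[k] = (pa, na, pd, nd)
--     for x in deleted:
--         if x:
--             k = abs(x)
--             pa, na, pd, nd = flags.get(k, (False, False, False, False))
--             if x > 0:
--                 pd = True
--             else:
--                 nd = True
--             flags[k] = (pa, na, pd, nd)
--     res_a, res_d, res_t = [], [], []
--     for k in sorted(flags):
--         pa, na, pd, nd = flags[k]
--         if (pa and (pd or nd)) or (pd and (pa or na)):
--             res_t.append(k)
--         elif pa:
--             res_a.append(k)
--         elif pd:
--             res_d.append(k)
--     return res_a, res_d, res_t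
-- ===== Notes on version B (the rewrite author's own statement) =====
-- stated objective: alternative
-- what changed: A builds sets of each side and tests {x,-x} membership across sides in several comprehensions plus three separate sorts; B instead makes one keyed pass building a single dict from |x| to four role flags (pos/neg in added/deleted) and then one sweep over the sorted keys classifying each line number into added/deleted/touched.
import Mathlib
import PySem

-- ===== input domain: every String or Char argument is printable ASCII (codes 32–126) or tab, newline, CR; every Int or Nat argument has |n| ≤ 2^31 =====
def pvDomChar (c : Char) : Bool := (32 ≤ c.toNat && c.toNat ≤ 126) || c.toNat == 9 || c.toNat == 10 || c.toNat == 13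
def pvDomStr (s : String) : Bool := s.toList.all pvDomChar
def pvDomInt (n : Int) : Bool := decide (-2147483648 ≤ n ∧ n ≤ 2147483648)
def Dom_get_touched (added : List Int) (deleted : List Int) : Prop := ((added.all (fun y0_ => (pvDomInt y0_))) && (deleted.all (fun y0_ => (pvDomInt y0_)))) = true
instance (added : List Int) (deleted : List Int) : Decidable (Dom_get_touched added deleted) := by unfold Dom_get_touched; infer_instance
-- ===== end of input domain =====

-- B replaces A's cross-set comprehensions by a single keyed pass: one dict from |x| to
-- four role flags, then one sweep over the sorted keys classifying each line
-- (alternative decomposition, same asymptotic cost).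

-- ===== PORT A =====
def get_touched (added : List Int) (deleted : List Int) : List Int × List Int × List Int :=
  let addedS := PySem.Set.ofList added
  let deletedS := PySem.Set.ofList deleted
  let touched := PySem.Set.ofList
    ((addedS.filter (fun x => decide (0 < x) &&
        !((PySem.Set.inter (PySem.Set.ofList [x, -x]) deletedS).isEmpty))).map (fun x => |x|))
  let touched2 := PySem.Set.union touched
    (PySem.Set.ofList
      ((deletedS.filter (fun x => decide (0 < x) &&
          !((PySem.Set.inter (PySem.Set.ofList [x, -x]) addedS).isEmpty))).map (fun x => |x|)))
  let added2 := addedS.filter (fun x => decide (0 < x) && !(PySem.Set.contains touched2 x))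
  let deleted2 := deletedS.filter (fun x => decide (0 < x) && !(PySem.Set.contains touched2 x))
  (PySem.List.sorted added2 (fun x => x) false,
   PySem.List.sorted deleted2 (fun x => x) false,
   PySem.List.sorted touched2 (fun x => x) false)

-- ===== PORT B =====
-- loop body over `added`: record x under |x| as positive/negative-in-added
def gtFlagsAdd (flags : PySem.Dict Int (Bool × Bool × Bool × Bool)) (x : Int) :
    PySem.Dict Int (Bool × Bool × Bool × Bool) :=
  if x ≠ 0 then
    let k := |x|
    let f := flags.getD k (false, false, false, false)
    if 0 < x then flags.insert k (true, f.2.1, f.2.2.1, f.2.2.2)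
    else flags.insert k (f.1, true, f.2.2.1, f.2.2.2)
  else flags

-- loop body over `deleted`: record x under |x| as positive/negative-in-deleted
def gtFlagsDel (flags : PySem.Dict Int (Bool × Bool × Bool × Bool)) (x : Int) :
    PySem.Dict Int (Bool × Bool × Bool × Bool) :=
  if x ≠ 0 then
    let k := |x|
    let f := flags.getD k (false, false, false, false)
    if 0 < x then flags.insert k (f.1, f.2.1, true, f.2.2.2)
    else flags.insert k (f.1, f.2.1, f.2.2.1, true)
  else flags

-- body of the classification sweep over the sorted keys
def gtClassify (flags : PySem.Dict Int (Bool × Bool × Bool × Bool))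
    (acc : List Int × List Int × List Int) (k : Int) : List Int × List Int × List Int :=
  let f := flags.getD k (false, false, false, false)
  if (f.1 && (f.2.2.1 || f.2.2.2)) || (f.2.2.1 && (f.1 || f.2.1)) then
    (acc.1, acc.2.1, acc.2.2 ++ [k])
  else if f.1 then (acc.1 ++ [k], acc.2.1, acc.2.2)
  else if f.2.2.1 then (acc.1, acc.2.1 ++ [k], acc.2.2)
  else acc

def get_touched_alt (added : List Int) (deleted : List Int) : List Int × List Int × List Int :=
  let flags := deleted.foldl gtFlagsDel (added.foldl gtFlagsAdd PySem.Dict.empty)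
  let ks := PySem.List.sorted flags.keys (fun x => x) false
  ks.foldl (gtClassify flags) ([], [], [])

-- ===== PRECONDITION & SPEC =====
def Spec_get_touched (added : List Int) (deleted : List Int) (out : List Int × List Int × List Int) : Prop := out = get_touched_alt added deleted
instance (added : List Int) (deleted : List Int) (out : List Int × List Int × List Int) : Decidable (Spec_get_touched added deleted out) := by unfold Spec_get_touched; infer_instance

-- ===== CLAIM (what is proved, stated in full; the proofs are below) =====
def Claim_equal_get_touched : Prop := ∀ (added : List Int) (deleted : List Int), Dom_get_touched added deleted → Spec_get_touched added deleted (get_touched added deleted)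

-- ===== LEMMAS AND PROOFS =====

-- the abs-map in A maps over positives only, so it is the identity there
theorem pv_absmap_id (l : List Int) (t : List Int) :
    (l.filter (fun x => decide (0 < x) &&
        !((PySem.Set.inter (PySem.Set.ofList [x, -x]) t).isEmpty))).map (fun x => |x|)
    = l.filter (fun x => decide (0 < x) &&
        !((PySem.Set.inter (PySem.Set.ofList [x, -x]) t).isEmpty)) := by
  rw [List.map_congr_left (g := id), List.map_id]
  intro a ha
  have h := List.of_mem_filter ha
  simp only [Bool.and_eq_true, decide_eq_true_eq] at h
  exact abs_of_pos h.1

-- the truthiness test '{x, -x} & t' of A, as a membership condition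
theorem pv_inter_pair (x : Int) (t : List Int) :
    (¬ ((PySem.Set.inter (PySem.Set.ofList [x, -x]) t).isEmpty = true)) ↔ (x ∈ t ∨ -x ∈ t) := by
  rw [show (¬ ((PySem.Set.inter (PySem.Set.ofList [x, -x]) t).isEmpty = true)) ↔ ((PySem.Set.inter (PySem.Set.ofList [x, -x]) t).isEmpty = false) from (Bool.eq_false_iff).symm, List.isEmpty_eq_false_iff_exists_mem]
  constructor
  · rintro ⟨a, ha⟩
    have := (PySem.Set.mem_inter _ _ _).mp ha
    rcases this with ⟨h1, h2⟩
    rw [PySem.Set.mem_ofList] at h1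
    simp only [List.mem_cons, List.not_mem_nil, or_false] at h1
    rcases h1 with rfl | rfl
    · exact Or.inl h2
    · exact Or.inr h2
  · rintro (h | h)
    · exact ⟨x, (PySem.Set.mem_inter _ _ _).mpr ⟨by simp [PySem.Set.mem_ofList], h⟩⟩
    · exact ⟨-x, (PySem.Set.mem_inter _ _ _).mpr ⟨by simp [PySem.Set.mem_ofList], h⟩⟩

-- the same, phrased on `isEmpty = false` as simp leaves it
theorem pv_inter_pair' (x : Int) (t : List Int) :
    ((PySem.Set.inter (PySem.Set.ofList [x, -x]) t).isEmpty = false) ↔ (x ∈ t ∨ -x ∈ t) := by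
  rw [Bool.eq_false_iff]
  exact pv_inter_pair x t

theorem pv_contains_false (s : List Int) (x : Int) :
    (PySem.Set.contains s x = false) ↔ x ∉ s := by
  rw [Bool.eq_false_iff]
  exact not_congr (PySem.Set.contains_iff s x)

-- value of the flags dict after the `added` loop, at any positive key
theorem pv_foldl_add_getD (l : List Int) (d : PySem.Dict Int (Bool × Bool × Bool × Bool))
    (k : Int) (hk : 0 < k) :
    (l.foldl gtFlagsAdd d).getD k (false, false, false, false)
      = ((d.getD k (false, false, false, false)).1 || decide (k ∈ l),
         (d.getD k (false, false, false, false)).2.1 || decide (-k ∈ l),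
         (d.getD k (false, false, false, false)).2.2.1,
         (d.getD k (false, false, false, false)).2.2.2) := by
  induction l generalizing d with
  | nil => simp
  | cons x l ih =>
    simp only [List.foldl_cons]
    rw [ih]
    by_cases hx0 : x = 0
    · subst hx0
      have h0 : gtFlagsAdd d 0 = d := by simp [gtFlagsAdd]
      rw [h0]
      simp [List.mem_cons, show ¬ (k = 0) from by omega, show ¬ (-k = 0) from by omega]
    · by_cases hxp : 0 < x
      · have habs : |x| = x := abs_of_pos hxp
        simp only [gtFlagsAdd, if_pos hx0, habs, if_pos hxp, PySem.Dict.getD_insert]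
        by_cases hkx : k = x
        · subst hkx
          simp [List.mem_cons, show ¬ (-k = k) from by omega]
        · simp [hkx, List.mem_cons, show ¬ (-k = x) from by omega]
      · have hxn : x < 0 := by omega
        have habs : |x| = -x := abs_of_neg hxn
        simp only [gtFlagsAdd, if_pos hx0, habs, if_neg hxp, PySem.Dict.getD_insert]
        by_cases hkx : k = -x
        · simp [hkx, List.mem_cons, show ¬ (-x = x) from by omega]
        · simp [hkx, List.mem_cons, show ¬ (k = x) from by omega, show ¬ (-k = x) from by omega]

-- value of the flags dict after the `deleted` loop, at any positive key
theorem pv_foldl_del_getD (l : List Int) (d : PySem.Dict Int (Bool × Bool × Bool × Bool))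
    (k : Int) (hk : 0 < k) :
    (l.foldl gtFlagsDel d).getD k (false, false, false, false)
      = ((d.getD k (false, false, false, false)).1,
         (d.getD k (false, false, false, false)).2.1,
         (d.getD k (false, false, false, false)).2.2.1 || decide (k ∈ l),
         (d.getD k (false, false, false, false)).2.2.2 || decide (-k ∈ l)) := by
  induction l generalizing d with
  | nil => simp
  | cons x l ih =>
    simp only [List.foldl_cons]
    rw [ih]
    by_cases hx0 : x = 0
    · subst hx0
      have h0 : gtFlagsDel d 0 = d := by simp [gtFlagsDel]
      rw [h0]
      simp [List.mem_cons, show ¬ (k = 0) from by omega, show ¬ (-k = 0) from by omega]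
    · by_cases hxp : 0 < x
      · have habs : |x| = x := abs_of_pos hxp
        simp only [gtFlagsDel, if_pos hx0, habs, if_pos hxp, PySem.Dict.getD_insert]
        by_cases hkx : k = x
        · subst hkx
          simp [List.mem_cons, show ¬ (-k = k) from by omega]
        · simp [hkx, List.mem_cons, show ¬ (-k = x) from by omega]
      · have hxn : x < 0 := by omega
        have habs : |x| = -x := abs_of_neg hxn
        simp only [gtFlagsDel, if_pos hx0, habs, if_neg hxp, PySem.Dict.getD_insert]
        by_cases hkx : k = -x
        · simp [hkx, List.mem_cons, show ¬ (-x = x) from by omega]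
        · simp [hkx, List.mem_cons, show ¬ (k = x) from by omega, show ¬ (-k = x) from by omega]

-- keys accumulated by the `added` loop: the absolute values of its nonzero elements
theorem pv_foldl_add_keys (l : List Int) (d : PySem.Dict Int (Bool × Bool × Bool × Bool)) (k : Int) :
    k ∈ (l.foldl gtFlagsAdd d).keys ↔ k ∈ d.keys ∨ ∃ x ∈ l, x ≠ 0 ∧ |x| = k := by
  induction l generalizing d with
  | nil => simp
  | cons x l ih =>
    simp only [List.foldl_cons]
    rw [ih]
    by_cases hx0 : x = 0
    · subst hx0
      have h0 : gtFlagsAdd d 0 = d := by simp [gtFlagsAdd]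
      rw [h0]
      constructor
      · rintro (h | ⟨y, hy, h1, h2⟩)
        · exact Or.inl h
        · exact Or.inr ⟨y, List.mem_cons_of_mem _ hy, h1, h2⟩
      · rintro (h | ⟨y, hy, h1, h2⟩)
        · exact Or.inl h
        · rcases List.mem_cons.mp hy with rfl | hy
          · omega
          · exact Or.inr ⟨y, hy, h1, h2⟩
    · have hmem : k ∈ (gtFlagsAdd d x).keys ↔ k = |x| ∨ k ∈ d.keys := by
        unfold gtFlagsAdd
        simp only [if_pos hx0]
        split_ifs <;> exact PySem.Dict.mem_keys_insert _ _ _ _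
      rw [hmem]
      constructor
      · rintro ((rfl | h) | ⟨y, hy, h1, h2⟩)
        · exact Or.inr ⟨x, List.mem_cons_self, hx0, rfl⟩
        · exact Or.inl h
        · exact Or.inr ⟨y, List.mem_cons_of_mem _ hy, h1, h2⟩
      · rintro (h | ⟨y, hy, h1, h2⟩)
        · exact Or.inl (Or.inr h)
        · rcases List.mem_cons.mp hy with rfl | hy
          · exact Or.inl (Or.inl h2.symm)
          · exact Or.inr ⟨y, hy, h1, h2⟩

theorem pv_foldl_del_keys (l : List Int) (d : PySem.Dict Int (Bool × Bool × Bool × Bool)) (k : Int) :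
    k ∈ (l.foldl gtFlagsDel d).keys ↔ k ∈ d.keys ∨ ∃ x ∈ l, x ≠ 0 ∧ |x| = k := by
  induction l generalizing d with
  | nil => simp
  | cons x l ih =>
    simp only [List.foldl_cons]
    rw [ih]
    by_cases hx0 : x = 0
    · subst hx0
      have h0 : gtFlagsDel d 0 = d := by simp [gtFlagsDel]
      rw [h0]
      constructor
      · rintro (h | ⟨y, hy, h1, h2⟩)
        · exact Or.inl h
        · exact Or.inr ⟨y, List.mem_cons_of_mem _ hy, h1, h2⟩
      · rintro (h | ⟨y, hy, h1, h2⟩)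
        · exact Or.inl h
        · rcases List.mem_cons.mp hy with rfl | hy
          · omega
          · exact Or.inr ⟨y, hy, h1, h2⟩
    · have hmem : k ∈ (gtFlagsDel d x).keys ↔ k = |x| ∨ k ∈ d.keys := by
        unfold gtFlagsDel
        simp only [if_pos hx0]
        split_ifs <;> exact PySem.Dict.mem_keys_insert _ _ _ _
      rw [hmem]
      constructor
      · rintro ((rfl | h) | ⟨y, hy, h1, h2⟩)
        · exact Or.inr ⟨x, List.mem_cons_self, hx0, rfl⟩
        · exact Or.inl h
        · exact Or.inr ⟨y, List.mem_cons_of_mem _ hy, h1, h2⟩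
      · rintro (h | ⟨y, hy, h1, h2⟩)
        · exact Or.inl (Or.inr h)
        · rcases List.mem_cons.mp hy with rfl | hy
          · exact Or.inl (Or.inl h2.symm)
          · exact Or.inr ⟨y, hy, h1, h2⟩

theorem pv_foldl_add_nodup (l : List Int) (d : PySem.Dict Int (Bool × Bool × Bool × Bool))
    (h : d.keys.Nodup) : (l.foldl gtFlagsAdd d).keys.Nodup := by
  induction l generalizing d with
  | nil => exact h
  | cons x l ih =>
    simp only [List.foldl_cons]
    apply ih
    unfold gtFlagsAdd
    split_ifs <;> first | exact PySem.Dict.nodup_keys_insert _ _ _ h | exact h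

theorem pv_foldl_del_nodup (l : List Int) (d : PySem.Dict Int (Bool × Bool × Bool × Bool))
    (h : d.keys.Nodup) : (l.foldl gtFlagsDel d).keys.Nodup := by
  induction l generalizing d with
  | nil => exact h
  | cons x l ih =>
    simp only [List.foldl_cons]
    apply ih
    unfold gtFlagsDel
    split_ifs <;> first | exact PySem.Dict.nodup_keys_insert _ _ _ h | exact h

-- the classification sweep is three filters over the visited keys
theorem pv_classify_foldl (flags : PySem.Dict Int (Bool × Bool × Bool × Bool)) (ks : List Int)
    (a0 d0 t0 : List Int) :
    ks.foldl (gtClassify flags) (a0, d0, t0)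
    = (a0 ++ ks.filter (fun k =>
          let f := flags.getD k (false, false, false, false)
          !((f.1 && (f.2.2.1 || f.2.2.2)) || (f.2.2.1 && (f.1 || f.2.1))) && f.1),
       d0 ++ ks.filter (fun k =>
          let f := flags.getD k (false, false, false, false)
          !((f.1 && (f.2.2.1 || f.2.2.2)) || (f.2.2.1 && (f.1 || f.2.1))) && (!f.1 && f.2.2.1)),
       t0 ++ ks.filter (fun k =>
          let f := flags.getD k (false, false, false, false)
          (f.1 && (f.2.2.1 || f.2.2.2)) || (f.2.2.1 && (f.1 || f.2.1)))) := by
  induction ks generalizing a0 d0 t0 with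
  | nil => simp
  | cons k ks ih =>
    simp only [List.foldl_cons, List.filter_cons]
    rcases hget : flags.getD k (false, false, false, false) with ⟨pa, na, pd, nd⟩
    cases pa <;> cases na <;> cases pd <;> cases nd <;>
      simp [gtClassify, hget, ih, List.append_assoc]

-- ===== VERDICT (by name: the statement is the Claim_ definition above) =====
theorem get_touched_spec : Claim_equal_get_touched := by
  intro added deleted _
  unfold Spec_get_touched get_touched get_touched_alt
  simp only [pv_absmap_id]
  rw [pv_classify_foldl]
  simp only [List.nil_append]
  -- facts about the flags dict and its sorted key list
  have hnodupK : (deleted.foldl gtFlagsDel (added.foldl gtFlagsAdd PySem.Dict.empty)).keys.Nodup :=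
    pv_foldl_del_nodup _ _ (pv_foldl_add_nodup _ _ (by simp))
  have hgetF : ∀ a : Int, 0 < a →
      (deleted.foldl gtFlagsDel (added.foldl gtFlagsAdd PySem.Dict.empty)).getD a
        (false, false, false, false)
      = (decide (a ∈ added), decide (-a ∈ added), decide (a ∈ deleted), decide (-a ∈ deleted)) := by
    intro a ha
    rw [pv_foldl_del_getD _ _ _ ha, pv_foldl_add_getD _ _ _ ha]
    simp
  have hks : ∀ a : Int,
      a ∈ PySem.List.sorted (deleted.foldl gtFlagsDel (added.foldl gtFlagsAdd PySem.Dict.empty)).keys (fun x => x) false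
      ↔ (0 < a ∧ (a ∈ added ∨ -a ∈ added ∨ a ∈ deleted ∨ -a ∈ deleted)) := by
    intro a
    rw [PySem.List.mem_sorted, pv_foldl_del_keys, pv_foldl_add_keys]
    simp only [PySem.Dict.keys_empty, List.not_mem_nil, false_or]
    constructor
    · rintro (⟨x, hx, h0, habs⟩ | ⟨x, hx, h0, habs⟩)
      · have hpos : 0 < a := by have := abs_pos.mpr h0; omega
        refine ⟨hpos, ?_⟩
        have : x = a ∨ x = -a := by rcases abs_cases x with ⟨h, _⟩ | ⟨h, _⟩ <;> omega
        rcases this with rfl | rfl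
        · exact Or.inl hx
        · exact Or.inr (Or.inl (by simpa using hx))
      · have hpos : 0 < a := by have := abs_pos.mpr h0; omega
        refine ⟨hpos, ?_⟩
        have : x = a ∨ x = -a := by rcases abs_cases x with ⟨h, _⟩ | ⟨h, _⟩ <;> omega
        rcases this with rfl | rfl
        · exact Or.inr (Or.inr (Or.inl hx))
        · exact Or.inr (Or.inr (Or.inr (by simpa using hx)))
    · rintro ⟨hpos, h | h | h | h⟩
      · exact Or.inl ⟨a, h, by omega, abs_of_pos hpos⟩
      · exact Or.inl ⟨-a, h, by omega, by rw [abs_neg]; exact abs_of_pos hpos⟩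
      · exact Or.inr ⟨a, h, by omega, abs_of_pos hpos⟩
      · exact Or.inr ⟨-a, h, by omega, by rw [abs_neg]; exact abs_of_pos hpos⟩
  have hksNodup : (PySem.List.sorted (deleted.foldl gtFlagsDel (added.foldl gtFlagsAdd PySem.Dict.empty)).keys (fun x => x) false).Nodup :=
    (PySem.List.sorted_perm _ _ _).symm.nodup hnodupK
  have hksLt : (PySem.List.sorted (deleted.foldl gtFlagsDel (added.foldl gtFlagsAdd PySem.Dict.empty)).keys (fun x => x) false).Pairwise (· < ·) := by
    have h1 := PySem.List.sorted_pairwise (deleted.foldl gtFlagsDel (added.foldl gtFlagsAdd PySem.Dict.empty)).keys (fun x => x)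
    exact (h1.and hksNodup).imp (fun h => lt_of_le_of_ne h.1 h.2)
  refine Prod.ext ?_ (Prod.ext ?_ ?_)
  all_goals
    apply PySem.List.sorted_eq_of_perm_of_pairwise_lt
    case hs => exact List.Pairwise.sublist List.filter_sublist hksLt
    case hp =>
      refine (List.perm_ext_iff_of_nodup (hksNodup.filter _) ?_).mpr ?_
      · first
        | exact (PySem.Set.nodup_ofList added).filter _
        | exact (PySem.Set.nodup_ofList deleted).filter _
        | exact PySem.Set.nodup_union _ _ (PySem.Set.nodup_ofList _)
      · intro a
        rw [List.mem_filter, hks]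
        by_cases hpos : 0 < a
        · simp only [hgetF a hpos, List.mem_filter, PySem.Set.mem_union, PySem.Set.mem_ofList,
            Bool.and_eq_true, Bool.or_eq_true, Bool.not_eq_true', Bool.or_eq_false_iff,
            Bool.and_eq_false_iff, decide_eq_true_eq, decide_eq_false_iff_not,
            pv_inter_pair', pv_contains_false]
          tauto
        · constructor
          · rintro ⟨⟨h, _⟩, _⟩
            exact absurd h hpos
          · intro h
            exfalso
            simp only [List.mem_filter, PySem.Set.mem_union, PySem.Set.mem_ofList,
              Bool.and_eq_true, decide_eq_true_eq] at h
            tauto
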